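-- pv_equiv track=rewrite | github.com/smsali97/coding-practice | Arrays/check_sequence.py | findValidSubarray
-- ===== SOURCE A (Python) =====
-- def findValidSubarray(nums, k):
--   n = len(nums)
--   dp = [1 for _ in range(n)]
--   for i in range(1, n):
--     if nums[i-1] + 1 == nums[i]:
--       dp[i] = dp[i-1] + 1
--
--   for end in range(n-1, -1, -1):
--     if dp[end] == k:
--       if end - k >= 0 and dp[end - k] >= k:
--         return nums[end-2*k+1:end+1]
--     elif end > 0 and (dp[end] % k) == 0:
--       return nums[end-2*k+1:end+1]
--   return []
-- ===== SOURCE B (Python) =====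
-- def findValidSubarray(nums, k):
--     # Single forward pass, O(1) extra space: track the current run length, the
--     # length of the run just before it, and the largest qualifying end index;
--     # slice once at the end.
--     best = -1
--     cur = 0        # length of the run ending at the previous index
--     prev_run = 0   # length of the run immediately before the current one
--     prev = None
--     for i, v in enumerate(nums):
--         if prev is not None and prev + 1 == v:
--             cur += 1
--         else:
--             prev_run, cur = cur, 1
--         prev = v
--         if cur == k:
--             if i - k >= 0 and prev_run >= k:
--                 best = i
--         elif i > 0 and cur % k == 0:
--             best = i
--     if best < 0:
--         return []
--     return nums[best - 2 * k + 1:best + 1]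
-- ===== Notes on version B (the rewrite author's own statement) =====
-- stated objective: alternative
-- what changed: B replaces A's two staged passes (build a dp array of run offsets, then scan indices backward returning the first hit) by one forward pass with O(1) extra state (current run length, previous run length, last value) that keeps the largest qualifying end index and slices once at the end; correctness rests on the first backward hit being the largest qualifying index.
import Mathlib
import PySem

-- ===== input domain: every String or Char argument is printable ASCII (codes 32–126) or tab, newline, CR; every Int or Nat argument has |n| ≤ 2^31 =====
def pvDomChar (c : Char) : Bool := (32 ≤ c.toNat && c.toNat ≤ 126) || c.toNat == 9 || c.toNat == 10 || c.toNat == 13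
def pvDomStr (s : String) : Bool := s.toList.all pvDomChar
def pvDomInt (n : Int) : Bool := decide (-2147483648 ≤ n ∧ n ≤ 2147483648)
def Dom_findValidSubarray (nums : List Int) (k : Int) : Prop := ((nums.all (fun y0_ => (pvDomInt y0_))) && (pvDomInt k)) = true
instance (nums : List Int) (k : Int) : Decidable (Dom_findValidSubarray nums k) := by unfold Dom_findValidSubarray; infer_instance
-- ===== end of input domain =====

-- B replaces A's dp array + backward scan by one forward pass with O(1) extra state that
-- keeps the largest qualifying end index (objective: alternative; same return value).

-- ===== PORT A =====
-- dp[i] = 1 initially; for i in range(1, n): if nums[i-1]+1 == nums[i]: dp[i] = dp[i-1]+1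
def buildDp (nums : List Int) : List Int :=
  (List.range' 1 (nums.length - 1)).foldl
    (fun dp i => if nums.getD (i-1) 0 + 1 = nums.getD i 0 then dp.set i (dp.getD (i-1) 0 + 1) else dp)
    (List.replicate nums.length (1 : Int))

-- for end in range(n-1, -1, -1): … ; the countdown loop is transliterated as recursion
-- on c = end+1 (c = 0 means the loop fell through and A returns []).
def scanA (nums dp : List Int) (k : Int) : ℕ → List Int
  | 0 => []
  | e+1 =>
    if dp.getD e 0 = k then
      if (e : Int) - k ≥ 0 ∧ dp.getD ((e : Int) - k).toNat 0 ≥ k then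
        PySem.List.slice nums (some ((e : Int) - 2*k + 1)) (some ((e : Int) + 1))
      else scanA nums dp k e
    else if 0 < e ∧ PySem.Int.mod (dp.getD e 0) k = 0 then
      PySem.List.slice nums (some ((e : Int) - 2*k + 1)) (some ((e : Int) + 1))
    else scanA nums dp k e

def findValidSubarray (nums : List Int) (k : Int) : List Int :=
  scanA nums (buildDp nums) k nums.length

-- ===== PORT B =====
-- loop body of B: state (best, cur, prev_run, prev), one enumerate item (i, v)
def stepB (k : Int) (st : Int × Int × Int × Option Int) (iv : Int × Int) : Int × Int × Int × Option Int :=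
  let best := st.1
  let cur := st.2.1
  let prevRun := st.2.2.1
  let prev := st.2.2.2
  let i := iv.1
  let v := iv.2
  -- if prev is not None and prev + 1 == v: cur += 1 else: prev_run, cur = cur, 1
  let cp : Int × Int :=
    match prev with
    | some p => if p + 1 = v then (cur + 1, prevRun) else (1, cur)
    | none => (1, cur)
  let best' :=
    if cp.1 = k then
      if i - k ≥ 0 ∧ cp.2 ≥ k then i else best
    else if 0 < i ∧ PySem.Int.mod cp.1 k = 0 then i else best
  (best', cp.1, cp.2, some v)

def findValidSubarray_alt (nums : List Int) (k : Int) : List Int :=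
  let st := (PySem.List.enumerate nums).foldl (stepB k) (-1, 0, 0, none)
  if st.1 < 0 then []
  else PySem.List.slice nums (some (st.1 - 2 * k + 1)) (some (st.1 + 1))

-- ===== PRECONDITION & SPEC =====
-- Pre_ excludes exactly the inputs where Python A raises ZeroDivisionError (k == 0 with
-- len(nums) >= 2, where the 'dp[end] % k' branch is reached); Python B raises there too.
def Pre_findValidSubarray (nums : List Int) (k : Int) : Prop :=
  ¬ (k = 0 ∧ 2 ≤ nums.length)

instance (nums : List Int) (k : Int) : Decidable (Pre_findValidSubarray nums k) := by
  unfold Pre_findValidSubarray; infer_instance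

def pvWitness_findValidSubarray : List Int × Int := ([1, 2, 3, 7, 8], 2)

def Spec_findValidSubarray (nums : List Int) (k : Int) (out : List Int) : Prop := out = findValidSubarray_alt nums k
instance (nums : List Int) (k : Int) (out : List Int) : Decidable (Spec_findValidSubarray nums k out) := by unfold Spec_findValidSubarray; infer_instance

-- ===== CLAIM (what is proved, stated in full; the proofs are below) =====
def Claim_equal_findValidSubarray : Prop := ∀ (nums : List Int) (k : Int), Dom_findValidSubarray nums k → Pre_findValidSubarray nums k → Spec_findValidSubarray nums k (findValidSubarray nums k)

-- ===== LEMMAS AND PROOFS =====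

-- dp[i] as a pure recursion: the 1-based offset of i inside its maximal consecutive-increasing run
def runDP (nums : List Int) : ℕ → ℕ
  | 0 => 1
  | i+1 => if nums.getD i 0 + 1 = nums.getD (i+1) 0 then runDP nums i + 1 else 1

-- the qualifying condition at index e, phrased with runDP (same branch order as both programs)
def Qb (nums : List Int) (k : Int) (e : ℕ) : Bool :=
  if ((runDP nums e : ℕ) : Int) = k then
    decide ((e : Int) - k ≥ 0 ∧ ((runDP nums ((e : Int) - k).toNat : ℕ) : Int) ≥ k)
  else
    decide (0 < e ∧ PySem.Int.mod ((runDP nums e : ℕ) : Int) k = 0)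

-- the largest qualifying index below m (-1 if none)
def bestSpec (nums : List Int) (k : Int) : ℕ → Int
  | 0 => -1
  | m+1 => if Qb nums k m then (m : Int) else bestSpec nums k m

-- the shape of A's backward scan, phrased with runDP
def goSpec (nums : List Int) (k : Int) : ℕ → List Int
  | 0 => []
  | e+1 =>
    if ((runDP nums e : ℕ) : Int) = k then
      if (e : Int) - k ≥ 0 ∧ ((runDP nums ((e : Int) - k).toNat : ℕ) : Int) ≥ k then
        PySem.List.slice nums (some ((e : Int) - 2*k + 1)) (some ((e : Int) + 1))
      else goSpec nums k e
    else if 0 < e ∧ PySem.Int.mod ((runDP nums e : ℕ) : Int) k = 0 then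
      PySem.List.slice nums (some ((e : Int) - 2*k + 1)) (some ((e : Int) + 1))
    else goSpec nums k e

theorem runDP_pos (nums : List Int) (e : ℕ) : 1 ≤ runDP nums e := by
  cases e with
  | zero => simp [runDP]
  | succ i => unfold runDP; split <;> omega

theorem buildDpAux (nums : List Int) (m : ℕ) (hm : m ≤ nums.length - 1) :
    (((List.range' 1 m).foldl
      (fun dp i => if nums.getD (i-1) 0 + 1 = nums.getD i 0 then dp.set i (dp.getD (i-1) 0 + 1) else dp)
      (List.replicate nums.length (1 : Int))).length = nums.length) ∧
    (∀ e, e < nums.length →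
      ((List.range' 1 m).foldl
        (fun dp i => if nums.getD (i-1) 0 + 1 = nums.getD i 0 then dp.set i (dp.getD (i-1) 0 + 1) else dp)
        (List.replicate nums.length (1 : Int))).getD e 0
        = if e ≤ m then ((runDP nums e : ℕ) : Int) else 1) := by
  induction m with
  | zero =>
    constructor
    · simp
    · intro e he
      simp [List.getD_eq_getElem?_getD, he]
      intro he0
      subst he0
      simp [runDP]
  | succ m ih =>
    have hm' : m ≤ nums.length - 1 := by omega
    obtain ⟨ihlen, ihval⟩ := ih hm'
    have hrange : List.range' 1 (m+1) = List.range' 1 m ++ [1+m] := by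
      rw [List.range'_concat]; simp
    rw [hrange, List.foldl_append]
    simp only [List.foldl_cons, List.foldl_nil]
    have h1m : 1 + m = m + 1 := by omega
    rw [h1m]
    set dp := (List.range' 1 m).foldl
        (fun dp i => if nums.getD (i-1) 0 + 1 = nums.getD i 0 then dp.set i (dp.getD (i-1) 0 + 1) else dp)
        (List.replicate nums.length (1 : Int)) with hdp
    have hmn : m + 1 < nums.length := by omega
    by_cases c : nums.getD (m + 1 - 1) 0 + 1 = nums.getD (m+1) 0
    · rw [if_pos c]
      have hset : m + 1 < dp.length := by rw [ihlen]; omega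
      constructor
      · rw [List.length_set, ihlen]
      · intro e he
        have hdpm : dp.getD (m + 1 - 1) 0 = ((runDP nums m : ℕ) : Int) := by
          have := ihval m (by omega)
          simpa using this
        by_cases hem : e = m + 1
        · subst hem
          rw [show (m+1-1) = m from rfl] at c hdpm
          have : (dp.set (m+1) (dp.getD (m+1-1) 0 + 1)).getD (m+1) 0
              = dp.getD (m+1-1) 0 + 1 := by
            simp [List.getD_eq_getElem?_getD, hset]
          rw [this]
          simp only [Nat.add_sub_cancel]
          rw [hdpm, if_pos (le_refl (m+1))]
          have : runDP nums (m+1) = runDP nums m + 1 := by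
            conv_lhs => rw [runDP]
            rw [if_pos c]
          rw [this]; push_cast; ring
        · have : (dp.set (m+1) (dp.getD (m+1-1) 0 + 1)).getD e 0 = dp.getD e 0 := by
            simp [List.getD_eq_getElem?_getD, Ne.symm hem]
          rw [this, ihval e he]
          by_cases h2 : e ≤ m
          · rw [if_pos h2, if_pos (by omega)]
          · rw [if_neg h2, if_neg (by omega)]
    · rw [if_neg c]
      constructor
      · exact ihlen
      · intro e he
        rw [ihval e he]
        by_cases hem : e = m + 1
        · subst hem
          rw [if_neg (by omega), if_pos (le_refl (m+1))]
          rw [show (m+1-1) = m from rfl] at c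
          have : runDP nums (m+1) = 1 := by
            unfold runDP; rw [if_neg c]
          rw [this]; simp
        · by_cases h2 : e ≤ m
          · rw [if_pos h2, if_pos (by omega)]
          · rw [if_neg h2, if_neg (by omega)]

theorem buildDp_getD (nums : List Int) (e : ℕ) (he : e < nums.length) :
    (buildDp nums).getD e 0 = ((runDP nums e : ℕ) : Int) := by
  have := (buildDpAux nums (nums.length - 1) le_rfl).2 e he
  unfold buildDp
  rw [this, if_pos (by omega)]

theorem scanA_eq_goSpec (nums : List Int) (k : Int) (c : ℕ) (hc : c ≤ nums.length) :
    scanA nums (buildDp nums) k c = goSpec nums k c := by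
  induction c with
  | zero => rfl
  | succ e ih =>
    have he : e < nums.length := by omega
    have ih' := ih (by omega)
    have h1 := buildDp_getD nums e he
    rw [scanA, goSpec, h1]
    by_cases c1 : ((runDP nums e : ℕ) : Int) = k
    · rw [if_pos c1, if_pos c1]
      have hk : 1 ≤ k := by
        have := runDP_pos nums e
        omega
      by_cases c2 : (e : Int) - k ≥ 0
      · have hlt : ((e : Int) - k).toNat < nums.length := by omega
        rw [buildDp_getD nums _ hlt]
        split_ifs with c3
        · rfl
        · exact ih'
      · rw [if_neg (fun h => c2 h.1), if_neg (fun h => c2 h.1)]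
        exact ih'
    · rw [if_neg c1, if_neg c1]
      split_ifs with c3
      · rfl
      · exact ih'

-- A's first hit from the top IS the largest qualifying index
theorem goSpec_eq_bestSpec (nums : List Int) (k : Int) (c : ℕ) :
    goSpec nums k c =
      if bestSpec nums k c < 0 then []
      else PySem.List.slice nums (some (bestSpec nums k c - 2*k + 1)) (some (bestSpec nums k c + 1)) := by
  induction c with
  | zero => simp [goSpec, bestSpec]
  | succ e ih =>
    rw [goSpec, bestSpec]
    by_cases c1 : ((runDP nums e : ℕ) : Int) = k
    · rw [if_pos c1]
      by_cases c2 : (e : Int) - k ≥ 0 ∧ ((runDP nums ((e : Int) - k).toNat : ℕ) : Int) ≥ k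
      · have hq : Qb nums k e = true := by
          unfold Qb; rw [if_pos c1]; exact decide_eq_true c2
        rw [if_pos c2, hq, if_pos rfl,
            if_neg (by omega : ¬ ((e : ℕ) : Int) < 0)]
      · have hq : Qb nums k e = false := by
          unfold Qb; rw [if_pos c1]; exact decide_eq_false c2
        rw [if_neg c2, hq]
        simpa using ih
    · rw [if_neg c1]
      by_cases c3 : 0 < e ∧ PySem.Int.mod ((runDP nums e : ℕ) : Int) k = 0
      · have hq : Qb nums k e = true := by
          unfold Qb; rw [if_neg c1]; exact decide_eq_true c3
        rw [if_pos c3, hq, if_pos rfl,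
            if_neg (by omega : ¬ ((e : ℕ) : Int) < 0)]
      · have hq : Qb nums k e = false := by
          unfold Qb; rw [if_neg c1]; exact decide_eq_false c3
        rw [if_neg c3, hq]
        simpa using ih

theorem runDP_append (nums : List Int) (x : Int) (j : ℕ) (hj : j < nums.length) :
    runDP (nums ++ [x]) j = runDP nums j := by
  induction j with
  | zero => rfl
  | succ i ih =>
    rw [runDP, runDP, List.getD_append _ _ _ _ (by omega),
        List.getD_append _ _ _ _ (by omega), ih (by omega)]

theorem runDP_concat (nums : List Int) (x : Int) (h : nums ≠ []) :
    runDP (nums ++ [x]) nums.length =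
      if nums.getD (nums.length - 1) 0 + 1 = x then runDP nums (nums.length - 1) + 1 else 1 := by
  obtain ⟨ys, y, rfl⟩ := List.eq_nil_or_concat nums |>.resolve_left h
  simp only [List.concat_eq_append]
  have hlen : (ys ++ [y]).length = ys.length + 1 := by simp
  rw [hlen, runDP]
  have g1 : (ys ++ [y] ++ [x]).getD ys.length 0 = y := by
    rw [List.getD_append _ _ _ _ (by simp)]
    simp [List.getD_eq_getElem?_getD]
  have g2 : (ys ++ [y] ++ [x]).getD (ys.length + 1) 0 = x := by
    have : ys.length + 1 = (ys ++ [y]).length := by simp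
    rw [this]
    simp [List.getD_eq_getElem?_getD]
  have g3 : (ys ++ [y]).getD (ys.length + 1 - 1) 0 = y := by
    simp [List.getD_eq_getElem?_getD]
  rw [g1, g2, g3, Nat.add_sub_cancel, runDP_append _ _ _ (by simp)]

theorem Qb_append (nums : List Int) (x k : Int) (e : ℕ) (he : e < nums.length) :
    Qb (nums ++ [x]) k e = Qb nums k e := by
  unfold Qb
  rw [runDP_append nums x e he]
  by_cases c1 : ((runDP nums e : ℕ) : Int) = k
  · rw [if_pos c1, if_pos c1]
    have hk : 1 ≤ k := by have := runDP_pos nums e; omega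
    by_cases c2 : (e : Int) - k ≥ 0
    · have hlt : ((e : Int) - k).toNat < nums.length := by omega
      rw [runDP_append nums x _ hlt]
    · rw [decide_eq_false (fun h => c2 h.1), decide_eq_false (fun h => c2 h.1)]
  · rw [if_neg c1, if_neg c1]

theorem bestSpec_append (nums : List Int) (x k : Int) (m : ℕ) (hm : m ≤ nums.length) :
    bestSpec (nums ++ [x]) k m = bestSpec nums k m := by
  induction m with
  | zero => rfl
  | succ m ih =>
    rw [bestSpec, bestSpec, Qb_append nums x k m (by omega), ih (by omega)]

-- invariant of B's forward fold: best is bestSpec, cur is runDP of the last index,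
-- prev is the last element, and prevRun is the previous run's length when one exists
theorem foldB_spec (k : Int) (nums : List Int) :
    ((PySem.List.enumerate nums).foldl (stepB k) (-1, 0, 0, none)).1 = bestSpec nums k nums.length ∧
    (nums = [] → (PySem.List.enumerate nums).foldl (stepB k) (-1, 0, 0, none) = (-1, 0, 0, none)) ∧
    (∀ l : ℕ, nums.length = l + 1 →
      ((PySem.List.enumerate nums).foldl (stepB k) (-1, 0, 0, none)).2.1 = ((runDP nums l : ℕ) : Int) ∧
      ((PySem.List.enumerate nums).foldl (stepB k) (-1, 0, 0, none)).2.2.2 = some (nums.getD l 0) ∧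
      (runDP nums l ≤ l →
        ((PySem.List.enumerate nums).foldl (stepB k) (-1, 0, 0, none)).2.2.1
          = ((runDP nums (l - runDP nums l) : ℕ) : Int))) := by
  induction nums using List.reverseRecOn with
  | nil => exact ⟨rfl, fun _ => rfl, fun l hl => by simp at hl⟩
  | append_singleton nums x ih =>
    obtain ⟨ihb, ihnil, ihcons⟩ := ih
    have henum : PySem.List.enumerate (nums ++ [x])
        = PySem.List.enumerate nums ++ [((nums.length : Int), x)] := by
      rw [PySem.List.enumerate_append]
      simp [PySem.List.enumerate]
    rw [henum, List.foldl_append, List.foldl_cons, List.foldl_nil]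
    set st := (PySem.List.enumerate nums).foldl (stepB k) (-1, 0, 0, none) with hst
    have hlen : (nums ++ [x]).length = nums.length + 1 := by simp
    have hgx : (nums ++ [x]).getD nums.length 0 = x := by
      simp [List.getD_eq_getElem?_getD]
    cases hn : nums with
    | nil =>
      subst hn
      rw [ihnil rfl]
      refine ⟨?_, fun h => by simp at h, ?_⟩
      · show (stepB k (-1, 0, 0, none) (0, x)).1 = bestSpec ([] ++ [x]) k ([] ++ [x]).length
        simp only [List.nil_append, List.length_singleton]
        rcases eq_or_ne k 1 with rfl | hk
        · norm_num [stepB, bestSpec, Qb, runDP]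
        · have hk' : ¬ ((1 : Int) = k) := fun h => hk h.symm
          simp [stepB, bestSpec, Qb, runDP, hk']
      · intro l hl
        have hl0 : l = 0 := by simp at hl; omega
        subst hl0
        refine ⟨?_, ?_, ?_⟩
        · show (stepB k (-1, 0, 0, none) (0, x)).2.1 = ((runDP ([] ++ [x]) 0 : ℕ) : Int)
          simp [stepB, runDP]
        · show (stepB k (-1, 0, 0, none) (0, x)).2.2.2 = some (([] ++ [x]).getD 0 0)
          simp [stepB]
        · intro hle
          rw [show runDP ([] ++ [x]) 0 = 1 from rfl] at hle
          omega
    | cons y ys =>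
      rw [← hn]
      have hne : nums ≠ [] := by rw [hn]; simp
      have hpos : 1 ≤ nums.length := by rw [hn]; simp
      set m := nums.length - 1 with hm
      have hnm : nums.length = m + 1 := by omega
      obtain ⟨hcur, hprev, hprun⟩ := ihcons m hnm
      have hrc := runDP_concat nums x hne
      rw [← hm] at hrc
      have hbs : bestSpec (nums ++ [x]) k nums.length = bestSpec nums k nums.length :=
        bestSpec_append nums x k nums.length le_rfl
      -- the step: prev = some (nums.getD m 0)
      have hstep : stepB k st ((nums.length : Int), x)
          = (if (match st.2.2.2 with
                  | some p => if p + 1 = x then (st.2.1 + 1, st.2.2.1) else ((1:Int), st.2.1)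
                  | none => ((1:Int), st.2.1)).1 = k then
               if (nums.length : Int) - k ≥ 0 ∧ (match st.2.2.2 with
                  | some p => if p + 1 = x then (st.2.1 + 1, st.2.2.1) else ((1:Int), st.2.1)
                  | none => ((1:Int), st.2.1)).2 ≥ k then (nums.length : Int) else st.1
             else if 0 < (nums.length : Int) ∧ PySem.Int.mod (match st.2.2.2 with
                  | some p => if p + 1 = x then (st.2.1 + 1, st.2.2.1) else ((1:Int), st.2.1)
                  | none => ((1:Int), st.2.1)).1 k = 0 then (nums.length : Int) else st.1,
             (match st.2.2.2 with
                  | some p => if p + 1 = x then (st.2.1 + 1, st.2.2.1) else ((1:Int), st.2.1)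
                  | none => ((1:Int), st.2.1)).1,
             (match st.2.2.2 with
                  | some p => if p + 1 = x then (st.2.1 + 1, st.2.2.1) else ((1:Int), st.2.1)
                  | none => ((1:Int), st.2.1)).2,
             some x) := rfl
      rw [hstep, hprev]
      by_cases cext : nums.getD m 0 + 1 = x
      · -- the run is extended: cur' = cur + 1
        simp only [if_pos cext]
        have hrn : runDP (nums ++ [x]) nums.length = runDP nums m + 1 := by
          rw [hrc, if_pos cext]
        have hcur' : st.2.1 + 1 = ((runDP (nums ++ [x]) nums.length : ℕ) : Int) := by
          rw [hcur, hrn]; push_cast; ring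
        have hQ : Qb (nums ++ [x]) k nums.length
            = (if ((runDP nums m : ℕ) : Int) + 1 = k then
                decide ((nums.length : Int) - k ≥ 0 ∧
                  ((runDP (nums ++ [x]) (((nums.length : ℕ) : Int) - k).toNat : ℕ) : Int) ≥ k)
              else decide (0 < nums.length ∧ PySem.Int.mod (((runDP nums m : ℕ) : Int) + 1) k = 0)) := by
          unfold Qb
          rw [hrn]
          push_cast
          rfl
        refine ⟨?_, fun h => by simp at h, ?_⟩
        · -- best component
          show _ = bestSpec (nums ++ [x]) k (nums ++ [x]).length
          rw [hlen, bestSpec, hbs, hQ, hcur, ← ihb]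
          by_cases c1 : ((runDP nums m : ℕ) : Int) + 1 = k
          · rw [if_pos c1, if_pos c1]
            by_cases c2 : (nums.length : Int) - k ≥ 0
            · have hk1 : 1 ≤ k := by have := runDP_pos nums m; omega
              have htn : (((nums.length : ℕ) : Int) - k).toNat = nums.length - k.toNat := by omega
              have hlt : nums.length - k.toNat < nums.length := by omega
              have hsame : ((runDP (nums ++ [x]) (((nums.length : ℕ) : Int) - k).toNat : ℕ) : Int)
                  = ((runDP nums (nums.length - k.toNat) : ℕ) : Int) := by
                rw [htn, runDP_append nums x _ hlt]
              -- relate prevRun to runDP (nums.length - k.toNat)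
              have hled : runDP nums m ≤ m := by omega
              have hpr := hprun hled
              have hidx : m - runDP nums m = nums.length - k.toNat := by omega
              rw [hidx] at hpr
              by_cases c3 : ((runDP nums (nums.length - k.toNat) : ℕ) : Int) ≥ k
              · have hL : (nums.length : Int) - k ≥ 0 ∧ st.2.2.1 ≥ k := ⟨c2, by rw [hpr]; exact c3⟩
                have hR : (nums.length : Int) - k ≥ 0 ∧
                    ((runDP (nums ++ [x]) (((nums.length : ℕ) : Int) - k).toNat : ℕ) : Int) ≥ k := by
                  rw [hsame]; exact ⟨c2, c3⟩
                rw [if_pos hL, if_pos (decide_eq_true hR)]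
              · have hL : ¬ ((nums.length : Int) - k ≥ 0 ∧ st.2.2.1 ≥ k) :=
                  fun h => c3 (by rw [← hpr]; exact h.2)
                have hR : ¬ (decide ((nums.length : Int) - k ≥ 0 ∧
                    ((runDP (nums ++ [x]) (((nums.length : ℕ) : Int) - k).toNat : ℕ) : Int) ≥ k) = true) := by
                  simp only [decide_eq_true_eq]
                  exact fun h => c3 (by rw [← hsame]; exact h.2)
                rw [if_neg hL, if_neg hR]
            · have hL : ¬ ((nums.length : Int) - k ≥ 0 ∧ st.2.2.1 ≥ k) := fun h => c2 h.1
              have hR : ¬ (decide ((nums.length : Int) - k ≥ 0 ∧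
                  ((runDP (nums ++ [x]) (((nums.length : ℕ) : Int) - k).toNat : ℕ) : Int) ≥ k) = true) := by
                simp only [decide_eq_true_eq]
                exact fun h => c2 h.1
              rw [if_neg hL, if_neg hR]
          · rw [if_neg c1, if_neg c1]
            by_cases c3 : PySem.Int.mod (((runDP nums m : ℕ) : Int) + 1) k = 0
            · have hL : (0 : Int) < (nums.length : Int) ∧
                  PySem.Int.mod (((runDP nums m : ℕ) : Int) + 1) k = 0 := ⟨by omega, c3⟩
              have hR : 0 < nums.length ∧ PySem.Int.mod (((runDP nums m : ℕ) : Int) + 1) k = 0 :=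
                ⟨by omega, c3⟩
              rw [if_pos hL, if_pos (decide_eq_true hR)]
            · have hL : ¬ ((0 : Int) < (nums.length : Int) ∧
                  PySem.Int.mod (((runDP nums m : ℕ) : Int) + 1) k = 0) := fun h => c3 h.2
              have hR : ¬ (decide (0 < nums.length ∧
                  PySem.Int.mod (((runDP nums m : ℕ) : Int) + 1) k = 0) = true) := by
                simp only [decide_eq_true_eq]
                exact fun h => c3 h.2
              rw [if_neg hL, if_neg hR]
        · -- structural components
          intro l hl
          have hl' : l = nums.length := by rw [hlen] at hl; omega
          subst hl'
          refine ⟨by rw [← hcur'], by rw [hgx], ?_⟩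
          intro _
          have hled : runDP nums m ≤ m := by
            have : runDP (nums ++ [x]) nums.length = runDP nums m + 1 := hrn
            omega
          have hpr := hprun hled
          have hidx : nums.length - runDP (nums ++ [x]) nums.length = m - runDP nums m := by
            rw [hrn]; omega
          have hlt2 : m - runDP nums m < nums.length := by omega
          show st.2.2.1 = _
          rw [hpr, hidx, runDP_append nums x _ hlt2]
      · -- a new run starts at index nums.length: cur' = 1, prevRun' = cur
        simp only [if_neg cext]
        have hrn : runDP (nums ++ [x]) nums.length = 1 := by
          rw [hrc, if_neg cext]
        have hQ : Qb (nums ++ [x]) k nums.length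
            = (if (1 : Int) = k then
                decide ((nums.length : Int) - k ≥ 0 ∧
                  ((runDP (nums ++ [x]) (((nums.length : ℕ) : Int) - k).toNat : ℕ) : Int) ≥ k)
              else decide (0 < nums.length ∧ PySem.Int.mod (1 : Int) k = 0)) := by
          unfold Qb
          rw [hrn]
          push_cast
          rfl
        refine ⟨?_, fun h => by simp at h, ?_⟩
        · show _ = bestSpec (nums ++ [x]) k (nums ++ [x]).length
          rw [hlen, bestSpec, hbs, hQ, hcur, ← ihb]
          by_cases c1 : (1 : Int) = k
          · rw [if_pos c1, if_pos c1]
            -- k = 1: (n:Int) - 1 ≥ 0 always here (n ≥ 1); prevRun' = cur = runDP nums m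
            have c2 : (nums.length : Int) - k ≥ 0 := by omega
            have htn : (((nums.length : ℕ) : Int) - k).toNat = m := by omega
            have hsame : ((runDP (nums ++ [x]) (((nums.length : ℕ) : Int) - k).toNat : ℕ) : Int)
                = ((runDP nums m : ℕ) : Int) := by
              rw [htn, runDP_append nums x m (by omega)]
            by_cases c3 : ((runDP nums m : ℕ) : Int) ≥ k
            · have hR : (nums.length : Int) - k ≥ 0 ∧
                  ((runDP (nums ++ [x]) (((nums.length : ℕ) : Int) - k).toNat : ℕ) : Int) ≥ k := by
                rw [hsame]; exact ⟨c2, c3⟩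
              rw [if_pos (⟨c2, c3⟩ :
                    (nums.length : Int) - k ≥ 0 ∧ ((runDP nums m : ℕ) : Int) ≥ k), if_pos (decide_eq_true hR)]
            · have hL : ¬ ((nums.length : Int) - k ≥ 0 ∧ ((runDP nums m : ℕ) : Int) ≥ k) :=
                fun h => c3 h.2
              have hR : ¬ (decide ((nums.length : Int) - k ≥ 0 ∧
                  ((runDP (nums ++ [x]) (((nums.length : ℕ) : Int) - k).toNat : ℕ) : Int) ≥ k) = true) := by
                simp only [decide_eq_true_eq]
                exact fun h => c3 (by rw [← hsame]; exact h.2)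
              rw [if_neg hL, if_neg hR]
          · rw [if_neg c1, if_neg c1]
            by_cases c3 : PySem.Int.mod (1 : Int) k = 0
            · have hL : (0 : Int) < (nums.length : Int) ∧ PySem.Int.mod (1 : Int) k = 0 := ⟨by omega, c3⟩
              have hR : 0 < nums.length ∧ PySem.Int.mod (1 : Int) k = 0 := ⟨by omega, c3⟩
              rw [if_pos hL, if_pos (decide_eq_true hR)]
            · have hL : ¬ ((0 : Int) < (nums.length : Int) ∧ PySem.Int.mod (1 : Int) k = 0) :=
                fun h => c3 h.2
              have hR : ¬ (decide (0 < nums.length ∧ PySem.Int.mod (1 : Int) k = 0) = true) := by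
                simp only [decide_eq_true_eq]
                exact fun h => c3 h.2
              rw [if_neg hL, if_neg hR]
        · intro l hl
          have hl' : l = nums.length := by rw [hlen] at hl; omega
          subst hl'
          refine ⟨by rw [hrn]; rfl, by rw [hgx], ?_⟩
          intro _
          rw [hrn]
          show st.2.1 = _
          rw [hcur, runDP_append nums x _ (by omega)]

-- ===== VERDICT (by name: the statement is the Claim_ definition above) =====
theorem findValidSubarray_spec : Claim_equal_findValidSubarray := by
  intro nums k _ _
  unfold Spec_findValidSubarray findValidSubarray findValidSubarray_alt
  rw [scanA_eq_goSpec nums k nums.length le_rfl, goSpec_eq_bestSpec]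
  have hb := (foldB_spec k nums).1
  simp only [hb]
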